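-- pv_equiv track=rewrite | github.com/alexanderson/advent-of-code | 2018/puzzle_06/puzzle_06.py | biggest_finite_area
-- ===== SOURCE A (Python) =====
-- import collections
--
-- def biggest_finite_area(grid):
--     ignore_locations = set()
--     areas = collections.defaultdict(int)
--
--     for j, row in enumerate(grid):
--         for i, closest_location in enumerate(row):
--             areas[closest_location] += 1
--             if on_edge(i, j, grid):
--                 ignore_locations.add(closest_location)
--
--     for edge_location in ignore_locations:
--         del areas[edge_location]
--
--     return max(areas.values())
--
-- def on_edge(i, j, grid):
--     height = len(grid) - 1
--     width = len(grid[0]) - 1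
--     return (
--         i in (0, width) or
--         j in (0, height)
--     )
-- ===== SOURCE B (Python) =====
-- def biggest_finite_area(grid):
--     # Sort-then-scan: sort all (location, on-edge-flag) cells by location, then
--     # walk the sorted list once; each maximal run of one location yields its
--     # area, kept only if no cell of the run lies on the border.
--     height = len(grid) - 1
--     cells = sorted(
--         ((loc, i in (0, len(grid[0]) - 1) or j in (0, height))
--          for j, row in enumerate(grid) for i, loc in enumerate(row)),
--         key=lambda cell: cell[0])
--     finite_areas = []
--     k = 0
--     while k < len(cells):
--         loc = cells[k][0]
--         edged = False
--         size = 0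
--         while k < len(cells) and cells[k][0] == loc:
--             edged = edged or cells[k][1]
--             size += 1
--             k += 1
--         if not edged:
--             finite_areas.append(size)
--     return max(finite_areas)
-- ===== Notes on version B (the rewrite author's own statement) =====
-- stated objective: alternative
-- what changed: A counts every label in a defaultdict while testing each cell with on_edge, then deletes edge labels and takes max of the dict's values; B uses no dict or set at all: it sorts the (location, on-edge-flag) cell pairs by location and scans the sorted list once, emitting each run's length as a finite area when no cell of the run is flagged, returning the max of those run lengths.
import Mathlib
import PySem

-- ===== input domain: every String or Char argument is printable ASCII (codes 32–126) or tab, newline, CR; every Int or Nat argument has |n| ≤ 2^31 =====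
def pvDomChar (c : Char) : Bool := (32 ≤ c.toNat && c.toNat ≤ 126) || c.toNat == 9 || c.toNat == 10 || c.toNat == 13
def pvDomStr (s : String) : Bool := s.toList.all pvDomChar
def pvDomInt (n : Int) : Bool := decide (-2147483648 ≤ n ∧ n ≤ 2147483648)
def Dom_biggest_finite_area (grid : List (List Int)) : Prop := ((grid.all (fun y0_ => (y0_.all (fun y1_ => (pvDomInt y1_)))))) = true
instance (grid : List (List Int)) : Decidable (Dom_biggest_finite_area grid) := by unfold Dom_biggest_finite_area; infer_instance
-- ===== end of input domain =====

-- B replaces A's defaultdict-count + edge-set-deletion by a sort-then-scan with no dict or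
-- set at all: sort the (location, on-edge-flag) cells by location and emit each unflagged
-- run's length (objective: alternative algorithm, similar cost).

-- ===== PORT A =====
-- on_edge(i, j, grid): grid[0] ported as pyGetD with default [] — on_edge is only
-- called from inside the loop over grid's rows, where grid is nonempty, so the default is unreachable.
def on_edge (i j : Int) (grid : List (List Int)) : Bool :=
  let height : Int := (grid.length : Int) - 1
  let width : Int := (((PySem.List.pyGetD grid 0 []).length : Int) - 1)
  (i == 0 || i == width) || (j == 0 || j == height)

-- state = (ignore_locations, areas); Python's max raises ValueError on an empty dict:
-- Pre_ excludes exactly those grids, the .getD 0 default is unreachable inside Pre_.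
def biggest_finite_area (grid : List (List Int)) : Int :=
  let st :=
    (PySem.List.enumerate grid 0).foldl (fun st jrow =>
      (PySem.List.enumerate jrow.2 0).foldl (fun st icell =>
        (if on_edge icell.1 jrow.1 grid then PySem.Set.add st.1 icell.2 else st.1,
         st.2.modify icell.2 0 (· + 1))) st)
      ((PySem.Set.empty : PySem.Set Int), (PySem.Dict.empty : PySem.Dict Int Int))
  let areas := st.1.foldl (fun d k => d.erase k) st.2
  (PySem.List.max? areas.values (fun v => v)).getD 0

-- ===== PORT B =====
-- the per-cell test 'i in (0, len(grid[0]) - 1) or j in (0, height)' of Source B's generator;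
-- len(grid[0]) is only evaluated when a row exists, so the pyGetD default is unreachable.
def bfaEdgeFlag (grid : List (List Int)) (i j : Int) : Bool :=
  (i == 0 || i == ((PySem.List.pyGetD grid 0 []).length : Int) - 1) ||
  (j == 0 || j == (grid.length : Int) - 1)

-- cells = sorted(((loc, flag) for j,row in enumerate(grid) for i,loc in enumerate(row)), key=cell[0])
def bfaCells (grid : List (List Int)) : List (Int × Bool) :=
  PySem.List.sorted
    ((PySem.List.enumerate grid 0).flatMap (fun jrow =>
      (PySem.List.enumerate jrow.2 0).map (fun icell => (icell.2, bfaEdgeFlag grid icell.1 jrow.1))))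
    (fun cell => cell.1) false

-- the while loop over the sorted cells: one maximal run of equal locations per step
def bfaScan : List (Int × Bool) → List Int
  | [] => []
  | c :: rest =>
    let run := rest.takeWhile (fun d => d.1 == c.1)
    let tail := bfaScan (rest.dropWhile (fun d => d.1 == c.1))
    if c.2 || run.any (fun d => d.2) then tail else ((run.length : Int) + 1) :: tail
termination_by l => l.length
decreasing_by
  exact Nat.lt_succ_of_le (List.length_dropWhile_le _ _)

-- max(finite_areas): Python raises ValueError on an empty list, excluded by Pre_
def biggest_finite_area_alt (grid : List (List Int)) : Int :=
  (PySem.List.max? (bfaScan (bfaCells grid)) (fun v => v)).getD 0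

-- ===== PRECONDITION & SPEC =====
-- Pre_ excludes exactly the grids on which Python A raises ValueError (max of an empty
-- sequence): grids with no cell whose label avoids every edge cell (in particular the
-- empty grid and grids of empty rows). Python B raises ValueError there too.
def Pre_biggest_finite_area (grid : List (List Int)) : Prop :=
  ∃ j < grid.length, ∃ i < (grid.getD j []).length,
    ¬ ∃ j' < grid.length, ∃ i' < (grid.getD j' []).length,
        (grid.getD j' []).getD i' 0 = (grid.getD j []).getD i 0 ∧
        (i' = 0 ∨ (i' : Int) = ((grid.getD 0 []).length : Int) - 1 ∨ j' = 0 ∨ j' = grid.length - 1)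
instance (grid : List (List Int)) : Decidable (Pre_biggest_finite_area grid) := by
  unfold Pre_biggest_finite_area; infer_instance

def pvWitness_biggest_finite_area : List (List Int) := [[1,1,1],[1,2,1],[1,1,1]]

def Spec_biggest_finite_area (grid : List (List Int)) (out : Int) : Prop := out = biggest_finite_area_alt grid
instance (grid : List (List Int)) (out : Int) : Decidable (Spec_biggest_finite_area grid out) := by unfold Spec_biggest_finite_area; infer_instance

-- ===== CLAIM (what is proved, stated in full; the proofs are below) =====
def Claim_equal_biggest_finite_area : Prop := ∀ (grid : List (List Int)), Dom_biggest_finite_area grid → Pre_biggest_finite_area grid → Spec_biggest_finite_area grid (biggest_finite_area grid)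

-- ===== LEMMAS AND PROOFS =====

-- membership in a fold that conditionally inserts into a PySem.Set
lemma mem_foldl_step {α : Type} (step : PySem.Set Int → α → PySem.Set Int) (Q : α → Int → Prop)
    (h : ∀ s a x, x ∈ step s a ↔ x ∈ s ∨ Q a x) (l : List α) (s0 : PySem.Set Int) (x : Int) :
    x ∈ l.foldl step s0 ↔ x ∈ s0 ∨ ∃ a ∈ l, Q a x := by
  induction l generalizing s0 with
  | nil => simp
  | cons a t ih => simp [List.foldl_cons, ih, h]; tauto

-- erasing every key of ks from d filters its items
lemma items_foldl_erase (ks : List Int) (d : PySem.Dict Int Int) :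
    (ks.foldl (fun d k => d.erase k) d).items = d.items.filter (fun p => !ks.contains p.1) := by
  induction ks generalizing d with
  | nil => simp
  | cons k t ih =>
      rw [List.foldl_cons, ih]
      simp only [PySem.Dict.erase, List.filter_filter]
      apply List.filter_congr
      intro p _
      cases h1 : p.1 == k <;> cases h2 : decide (p.1 ∈ t) <;> simp_all

-- the pair fold of A splits into two independent folds
lemma A_fold_split (grid : List (List Int)) :
    ((PySem.List.enumerate grid 0).foldl (fun st jrow =>
      (PySem.List.enumerate jrow.2 0).foldl (fun st icell =>
        (if on_edge icell.1 jrow.1 grid then PySem.Set.add st.1 icell.2 else st.1,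
         st.2.modify icell.2 0 (· + 1))) st)
      ((PySem.Set.empty : PySem.Set Int), (PySem.Dict.empty : PySem.Dict Int Int))) =
    ((PySem.List.enumerate grid 0).foldl (fun s jrow =>
        (PySem.List.enumerate jrow.2 0).foldl (fun s icell =>
          if on_edge icell.1 jrow.1 grid then PySem.Set.add s icell.2 else s) s) PySem.Set.empty,
     (PySem.List.enumerate grid 0).foldl (fun d jrow =>
        (PySem.List.enumerate jrow.2 0).foldl (fun d icell =>
          d.modify icell.2 0 (· + 1)) d) PySem.Dict.empty) := by
  have hstep : ∀ (st : PySem.Set Int × PySem.Dict Int Int) (jrow : Int × List Int),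
      (PySem.List.enumerate jrow.2 0).foldl (fun st icell =>
        (if on_edge icell.1 jrow.1 grid then PySem.Set.add st.1 icell.2 else st.1,
         st.2.modify icell.2 0 (· + 1))) st =
      ((PySem.List.enumerate jrow.2 0).foldl (fun s icell =>
          if on_edge icell.1 jrow.1 grid then PySem.Set.add s icell.2 else s) st.1,
       (PySem.List.enumerate jrow.2 0).foldl (fun d icell => d.modify icell.2 0 (· + 1)) st.2) := by
    intro st jrow
    cases st
    exact PySem.List.foldl_prod_mk
      (fun (s : PySem.Set Int) (icell : Int × Int) => if on_edge icell.1 jrow.1 grid then PySem.Set.add s icell.2 else s)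
      (fun (d : PySem.Dict Int Int) (icell : Int × Int) => d.modify icell.2 0 (· + 1)) _ _ _
  simp only [hstep]
  exact PySem.List.foldl_prod_mk
    (fun (s : PySem.Set Int) (jrow : Int × List Int) => (PySem.List.enumerate jrow.2 0).foldl (fun s icell =>
      if on_edge icell.1 jrow.1 grid then PySem.Set.add s icell.2 else s) s)
    (fun (d : PySem.Dict Int Int) (jrow : Int × List Int) => (PySem.List.enumerate jrow.2 0).foldl (fun d icell =>
      d.modify icell.2 0 (· + 1)) d) _ _ _

-- A's areas dict is Counter(flattened grid)
lemma A_areas_eq_counter (grid : List (List Int)) :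
    (PySem.List.enumerate grid 0).foldl (fun d jrow =>
        (PySem.List.enumerate jrow.2 0).foldl (fun d icell =>
          d.modify icell.2 0 (· + 1)) d) PySem.Dict.empty =
      PySem.Dict.counter (grid.flatMap (fun row => row)) := by
  have inner : ∀ (row : List Int) (d : PySem.Dict Int Int),
      (PySem.List.enumerate row 0).foldl (fun d icell => d.modify icell.2 0 (· + 1)) d
        = row.foldl (fun d c => d.modify c 0 (· + 1)) d := by
    intro row d
    conv_rhs => rw [← PySem.List.map_snd_enumerate row 0, List.foldl_map]
  rw [PySem.Dict.counter_eq_foldl,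
    show grid.flatMap (fun row => row) = grid.flatten by simp, List.foldl_flatten]
  conv_rhs => rw [← PySem.List.map_snd_enumerate grid 0, List.foldl_map]
  simp only [← inner]

-- membership characterisation of A's ignore set
lemma A_ignore_mem (grid : List (List Int)) (x : Int) :
    x ∈ (PySem.List.enumerate grid 0).foldl (fun s jrow =>
        (PySem.List.enumerate jrow.2 0).foldl (fun s icell =>
          if on_edge icell.1 jrow.1 grid then PySem.Set.add s icell.2 else s) s) PySem.Set.empty ↔
      ∃ j : Nat, ∃ _ : j < grid.length, ∃ i : Nat, ∃ _ : i < (grid.getD j []).length,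
        on_edge (i : Int) (j : Int) grid = true ∧ (grid.getD j []).getD i 0 = x := by
  rw [mem_foldl_step
      (fun (s : PySem.Set Int) (jrow : Int × List Int) =>
        (PySem.List.enumerate jrow.2 0).foldl (fun s icell =>
          if on_edge icell.1 jrow.1 grid then PySem.Set.add s icell.2 else s) s)
      (fun (jrow : Int × List Int) (x : Int) => ∃ ic ∈ PySem.List.enumerate jrow.2 0,
        on_edge ic.1 jrow.1 grid = true ∧ ic.2 = x)
      (fun s a x =>
        mem_foldl_step
          (fun (s : PySem.Set Int) (icell : Int × Int) =>
            if on_edge icell.1 a.1 grid then PySem.Set.add s icell.2 else s)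
          (fun (ic : Int × Int) (x : Int) => on_edge ic.1 a.1 grid = true ∧ ic.2 = x)
          (by intro s b x; dsimp only; split_ifs with hc <;> simp [PySem.Set.mem_add, hc, eq_comm])
          _ s x)]
  simp only [PySem.Set.empty, List.not_mem_nil, false_or, PySem.List.mem_enumerate_iff]
  constructor
  · rintro ⟨jrow, ⟨j, hj, rfl⟩, ic, ⟨i, hi, rfl⟩, he, rfl⟩
    dsimp only at hi he ⊢
    refine ⟨j, hj, i, ?_, ?_, ?_⟩
    · rwa [List.getD_eq_getElem _ _ hj]
    · simpa using he
    · rw [List.getD_eq_getElem _ _ hj]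
      exact List.getD_eq_getElem _ _ hi
  · rintro ⟨j, hj, i, hi, he, hx⟩
    rw [List.getD_eq_getElem _ _ hj] at hi hx
    rw [List.getD_eq_getElem _ _ hi] at hx
    exact ⟨(0 + (j : Int), grid[j]), ⟨j, hj, rfl⟩, (0 + (i : Int), grid[j][i]),
      ⟨i, hi, rfl⟩, by simpa using he, hx⟩

def distinctKeys : List (Int × Bool) → List Int
  | [] => []
  | c :: rest => c.1 :: distinctKeys (rest.dropWhile (fun d => d.1 == c.1))
termination_by l => l.length
decreasing_by exact Nat.lt_succ_of_le (List.length_dropWhile_le _ _)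

lemma any_congr_of_mem {α : Type} (l : List α) (p q : α → Bool) (h : ∀ a ∈ l, p a = q a) :
    l.any p = l.any q := by
  induction l with
  | nil => rfl
  | cons a t ih =>
      simp only [List.any_cons, h a List.mem_cons_self,
        ih (fun b hb => h b (List.mem_cons_of_mem a hb))]

lemma keys_gt_dropWhile (c : Int × Bool) (rest : List (Int × Bool))
    (h : (c :: rest).Pairwise (fun a b => a.1 ≤ b.1)) :
    ∀ d ∈ rest.dropWhile (fun d => d.1 == c.1), c.1 < d.1 := by
  induction rest with
  | nil => simp
  | cons a t ih =>
      simp only [List.pairwise_cons, List.mem_cons] at h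
      by_cases hp : (a.1 == c.1) = true
      · rw [List.dropWhile_cons, if_pos hp]
        exact ih (List.pairwise_cons.mpr ⟨fun b hb => h.1 b (Or.inr hb), h.2.2⟩)
      · rw [List.dropWhile_cons, if_neg hp]
        intro d hd
        rcases List.mem_cons.mp hd with rfl | hd
        · have := h.1 d (Or.inl rfl); simp at hp; omega
        · have h1 := h.1 a (Or.inl rfl)
          have h2 := h.2.1 d hd
          simp at hp; omega

lemma pairwise_dropWhile_tail (c : Int × Bool) (rest : List (Int × Bool))
    (h : (c :: rest).Pairwise (fun a b => a.1 ≤ b.1)) :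
    (rest.dropWhile (fun d => d.1 == c.1)).Pairwise (fun a b => a.1 ≤ b.1) :=
  List.Pairwise.sublist ((List.dropWhile_sublist _).trans (List.sublist_cons_self c rest)) h

lemma keys_eq_takeWhile (c : Int × Bool) (rest : List (Int × Bool)) :
    ∀ d ∈ rest.takeWhile (fun d => d.1 == c.1), d.1 = c.1 := by
  intro d hd
  have := List.mem_takeWhile_imp hd
  simpa using this

lemma mem_distinctKeys : ∀ (l : List (Int × Bool)),
    l.Pairwise (fun a b => a.1 ≤ b.1) →
    ∀ x : Int, (x ∈ distinctKeys l ↔ x ∈ l.map (fun d => d.1)) := by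
  intro l
  induction l using distinctKeys.induct with
  | case1 => intro _ x; simp [distinctKeys]
  | case2 c rest ih =>
      intro h x
      have hih := ih (pairwise_dropWhile_tail c rest h) x
      rw [distinctKeys, List.mem_cons, hih, List.map_cons, List.mem_cons]
      constructor
      · rintro (rfl | hx)
        · exact Or.inl rfl
        · exact Or.inr (((List.dropWhile_sublist _).map _).subset hx)
      · rintro (rfl | hx)
        · exact Or.inl rfl
        · rw [← List.takeWhile_append_dropWhile (p := fun d => d.1 == c.1) (l := rest),
            List.map_append, List.mem_append] at hx
          rcases hx with hx | hx
          · rcases List.mem_map.mp hx with ⟨d, hd, hdx⟩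
            exact Or.inl (hdx ▸ (keys_eq_takeWhile c rest d hd))
          · exact Or.inr hx

lemma nodup_distinctKeys : ∀ (l : List (Int × Bool)),
    l.Pairwise (fun a b => a.1 ≤ b.1) → (distinctKeys l).Nodup := by
  intro l
  induction l using distinctKeys.induct with
  | case1 => intro _; simp [distinctKeys]
  | case2 c rest ih =>
      intro h
      rw [distinctKeys]
      refine List.nodup_cons.mpr ⟨?_, ih (pairwise_dropWhile_tail c rest h)⟩
      intro hmem
      rcases List.mem_map.mp ((mem_distinctKeys _ (pairwise_dropWhile_tail c rest h) c.1).mp hmem)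
        with ⟨d, hd, hdx⟩
      have := keys_gt_dropWhile c rest h d hd
      omega

lemma scan_eq : ∀ (l : List (Int × Bool)),
    l.Pairwise (fun a b => a.1 ≤ b.1) →
    bfaScan l = ((distinctKeys l).filter
        (fun x => !(l.any (fun d => d.1 == x && d.2)))).map
      (fun x => (((l.map (fun d => d.1)).count x : Nat) : Int)) := by
  intro l
  induction l using distinctKeys.induct with
  | case1 => intro _; simp [bfaScan, distinctKeys]
  | case2 c rest ih =>
      intro h
      have hpw := pairwise_dropWhile_tail c rest h
      have hih := ih hpw
      have hgt := keys_gt_dropWhile c rest h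
      have htk := keys_eq_takeWhile c rest
      have hsplit : rest.takeWhile (fun d => d.1 == c.1) ++ rest.dropWhile (fun d => d.1 == c.1) = rest :=
        List.takeWhile_append_dropWhile
      -- any over the full list at key c.1
      have hq_c : ((c :: rest).any (fun d => d.1 == c.1 && d.2))
          = (c.2 || (rest.takeWhile (fun d => d.1 == c.1)).any (fun d => d.2)) := by
        rw [List.any_cons, ← hsplit, List.any_append]
        have h1 : (rest.takeWhile (fun d => d.1 == c.1)).any (fun d => d.1 == c.1 && d.2)
            = (rest.takeWhile (fun d => d.1 == c.1)).any (fun d => d.2) :=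
          any_congr_of_mem _ _ _ (fun d hd => by simp [htk d hd])
        have h2 : (rest.dropWhile (fun d => d.1 == c.1)).any (fun d => d.1 == c.1 && d.2) = false :=
          List.any_eq_false.mpr (fun d hd => by have := hgt d hd; simp; omega)
        rw [h1, h2]
        simp
      -- count at key c.1
      have hcnt_c : ((c :: rest).map (fun d => d.1)).count c.1
          = (rest.takeWhile (fun d => d.1 == c.1)).length + 1 := by
        rw [List.map_cons, ← hsplit, List.map_append, List.count_cons, List.count_append]
        have h1 : ((rest.takeWhile (fun d => d.1 == c.1)).map (fun d => d.1)).count c.1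
            = (rest.takeWhile (fun d => d.1 == c.1)).length := by
          rw [← List.length_map (as := rest.takeWhile (fun d => d.1 == c.1)) (f := fun d : Int × Bool => d.1)]
          exact List.count_eq_length.mpr (fun b hb => by
            rcases List.mem_map.mp hb with ⟨d, hd, rfl⟩
            exact (htk d hd).symm)
        have h2 : ((rest.dropWhile (fun d => d.1 == c.1)).map (fun d => d.1)).count c.1 = 0 :=
          List.count_eq_zero.mpr (fun hmem => by
            rcases List.mem_map.mp hmem with ⟨d, hd, hdx⟩
            have := hgt d hd; omega)
        rw [h1, h2]
        simp
      -- keys in the recursive tail are greater than c.1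
      have hxgt : ∀ x ∈ distinctKeys (rest.dropWhile (fun d => d.1 == c.1)), c.1 < x := by
        intro x hx
        rcases List.mem_map.mp ((mem_distinctKeys _ hpw x).mp hx) with ⟨d, hd, hdx⟩
        have := hgt d hd; omega
      have hq_x : ∀ x ∈ distinctKeys (rest.dropWhile (fun d => d.1 == c.1)),
          (!((c :: rest).any (fun d => d.1 == x && d.2)))
            = (!((rest.dropWhile (fun d => d.1 == c.1)).any (fun d => d.1 == x && d.2))) := by
        intro x hx
        have hxc := hxgt x hx
        congr 1
        rw [List.any_cons, ← hsplit, List.any_append]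
        have h0 : (c.1 == x && c.2) = false := by simp; omega
        have h1 : (rest.takeWhile (fun d => d.1 == c.1)).any (fun d => d.1 == x && d.2) = false :=
          List.any_eq_false.mpr (fun d hd => by have := htk d hd; simp; omega)
        rw [h0, h1]
        simp
      have hcnt_x : ∀ x ∈ distinctKeys (rest.dropWhile (fun d => d.1 == c.1)),
          ((c :: rest).map (fun d => d.1)).count x
            = ((rest.dropWhile (fun d => d.1 == c.1)).map (fun d => d.1)).count x := by
        intro x hx
        have hxc := hxgt x hx
        rw [List.map_cons, ← hsplit, List.map_append, List.count_cons, List.count_append]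
        have h1 : ((rest.takeWhile (fun d => d.1 == c.1)).map (fun d => d.1)).count x = 0 :=
          List.count_eq_zero.mpr (fun hmem => by
            rcases List.mem_map.mp hmem with ⟨d, hd, hdx⟩
            have := htk d hd; omega)
        have h2 : (c.1 == x) = false := by simp; omega
        rw [h1, h2]
        simp
      -- assemble
      have hstep : List.map (fun x => ((List.count x (List.map (fun d => d.1) (c :: rest)) : Nat) : Int))
            (List.filter (fun x => !((c :: rest).any (fun d => d.1 == x && d.2)))
              (distinctKeys (rest.dropWhile (fun d => d.1 == c.1))))
          = List.map (fun x => ((List.count x (List.map (fun d => d.1) (rest.dropWhile (fun d => d.1 == c.1))) : Nat) : Int))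
            (List.filter (fun x => !((rest.dropWhile (fun d => d.1 == c.1)).any (fun d => d.1 == x && d.2)))
              (distinctKeys (rest.dropWhile (fun d => d.1 == c.1)))) := by
        rw [List.filter_congr hq_x]
        exact List.map_congr_left (fun x hx => by rw [hcnt_x x (List.mem_filter.mp hx).1])
      rw [bfaScan, distinctKeys]
      rw [List.filter_cons]
      by_cases hb : (c.2 || (rest.takeWhile (fun d => d.1 == c.1)).any (fun d => d.2)) = true
      · rw [if_pos hb]
        have hqf : (!((c :: rest).any (fun d => d.1 == c.1 && d.2))) = false := by
          rw [hq_c, hb]; rfl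
        rw [if_neg (by rw [hqf]; exact Bool.false_ne_true)]
        rw [hih, ← hstep]
      · rw [if_neg hb]
        have hbf : (c.2 || (rest.takeWhile (fun d => d.1 == c.1)).any (fun d => d.2)) = false := by
          cases hB : (c.2 || (rest.takeWhile (fun d => d.1 == c.1)).any (fun d => d.2)) with
          | false => rfl
          | true => exact absurd hB hb
        have hqf : (!((c :: rest).any (fun d => d.1 == c.1 && d.2))) = true := by
          rw [hq_c, hbf]; rfl
        rw [if_pos hqf]
        rw [List.map_cons]
        congr 1
        · rw [hcnt_c]; push_cast; ring
        · rw [hih, ← hstep]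

-- identity-keyed max over a permuted list is the same value
lemma max?_id_perm (l l' : List Int) (h : l.Perm l') :
    PySem.List.max? l (fun v => v) = PySem.List.max? l' (fun v => v) := by
  cases hl : PySem.List.max? l (fun v => v) with
  | none =>
      rw [PySem.List.max?_eq_none_iff] at hl
      subst hl
      rw [eq_comm, PySem.List.max?_eq_none_iff]
      exact h.symm.eq_nil
  | some m =>
      cases hl' : PySem.List.max? l' (fun v => v) with
      | none =>
          rw [PySem.List.max?_eq_none_iff] at hl'
          subst hl'
          rw [h.eq_nil] at hl
          simp [PySem.List.max?] at hl
      | some m' =>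
          have h1 := PySem.List.max?_isMax hl' m (h.mem_iff.mp (PySem.List.max?_mem hl))
          have h2 := PySem.List.max?_isMax hl m' (h.mem_iff.mpr (PySem.List.max?_mem hl'))
          exact congrArg some (le_antisymm h1 h2)

-- Source B's inline border test is A's on_edge
lemma bfaEdgeFlag_eq_on_edge (grid : List (List Int)) (i j : Int) :
    bfaEdgeFlag grid i j = on_edge i j grid := by
  simp [bfaEdgeFlag, on_edge]

-- the unsorted cell generator's labels are the flattened grid
lemma map_fst_gen (grid : List (List Int)) :
    ((PySem.List.enumerate grid 0).flatMap (fun jrow =>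
      (PySem.List.enumerate jrow.2 0).map (fun icell => (icell.2, bfaEdgeFlag grid icell.1 jrow.1)))).map
        (fun d => d.1)
      = grid.flatMap (fun row => row) := by
  rw [List.map_flatMap]
  conv_rhs => rw [← PySem.List.map_snd_enumerate grid 0, List.flatMap_map]
  refine congrArg (List.flatMap · (PySem.List.enumerate grid 0)) (funext (fun jrow => ?_))
  rw [List.map_map]
  exact PySem.List.map_snd_enumerate jrow.2 0

lemma cells_pairwise (grid : List (List Int)) :
    (bfaCells grid).Pairwise (fun a b => a.1 ≤ b.1) :=
  PySem.List.sorted_pairwise _ _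

lemma cells_perm_gen (grid : List (List Int)) :
    (bfaCells grid).Perm ((PySem.List.enumerate grid 0).flatMap (fun jrow =>
      (PySem.List.enumerate jrow.2 0).map (fun icell => (icell.2, bfaEdgeFlag grid icell.1 jrow.1)))) :=
  PySem.List.sorted_perm _ _ _

lemma map_fst_cells_perm_flat (grid : List (List Int)) :
    ((bfaCells grid).map (fun d => d.1)).Perm (grid.flatMap (fun row => row)) := by
  have h := ((cells_perm_gen grid).map (fun d : Int × Bool => d.1))
  rwa [map_fst_gen] at h

-- a label has an edged cell in B's cell list iff A records it at some edge position
lemma cells_any_edge_iff (grid : List (List Int)) (x : Int) :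
    ((bfaCells grid).any (fun d => d.1 == x && d.2) = true) ↔
      ∃ j : Nat, ∃ _ : j < grid.length, ∃ i : Nat, ∃ _ : i < (grid.getD j []).length,
        on_edge (i : Int) (j : Int) grid = true ∧ (grid.getD j []).getD i 0 = x := by
  rw [List.any_eq_true]
  constructor
  · rintro ⟨d, hd, hcond⟩
    have hd' := (cells_perm_gen grid).mem_iff.mp hd
    rcases List.mem_flatMap.mp hd' with ⟨jrow, hjrow, hdin⟩
    rcases List.mem_map.mp hdin with ⟨icell, hicell, rfl⟩
    rcases (PySem.List.mem_enumerate_iff _ _ _).mp hjrow with ⟨j, hj, rfl⟩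
    rcases (PySem.List.mem_enumerate_iff _ _ _).mp hicell with ⟨i, hi, rfl⟩
    dsimp only at hcond hi ⊢
    simp only [Bool.and_eq_true, beq_iff_eq] at hcond
    refine ⟨j, hj, i, ?_, ?_, ?_⟩
    · rwa [List.getD_eq_getElem _ _ hj]
    · rw [← bfaEdgeFlag_eq_on_edge]
      have := hcond.2
      simpa using this
    · rw [List.getD_eq_getElem _ _ hj, List.getD_eq_getElem _ _ hi]
      exact hcond.1
  · rintro ⟨j, hj, i, hi, he, hx⟩
    rw [List.getD_eq_getElem _ _ hj] at hi hx
    rw [List.getD_eq_getElem _ _ hi] at hx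
    refine ⟨(grid[j][i], bfaEdgeFlag grid (0 + (i : Int)) (0 + (j : Int))), ?_, ?_⟩
    · apply (cells_perm_gen grid).mem_iff.mpr
      apply List.mem_flatMap.mpr
      refine ⟨(0 + (j : Int), grid[j]), (PySem.List.mem_enumerate_iff _ _ _).mpr ⟨j, hj, rfl⟩, ?_⟩
      exact List.mem_map.mpr ⟨(0 + (i : Int), grid[j][i]), (PySem.List.mem_enumerate_iff _ _ _).mpr ⟨i, hi, rfl⟩, rfl⟩
    · simp only [Bool.and_eq_true, beq_iff_eq]
      refine ⟨hx, ?_⟩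
      rw [bfaEdgeFlag_eq_on_edge]
      simpa using he

lemma main_eq (grid : List (List Int)) :
    biggest_finite_area grid = biggest_finite_area_alt grid := by
  simp only [biggest_finite_area, biggest_finite_area_alt]
  rw [A_fold_split]
  simp only [PySem.Dict.values]
  rw [items_foldl_erase, A_areas_eq_counter, PySem.Dict.items_counter,
    List.filter_map, List.map_map]
  rw [scan_eq _ (cells_pairwise grid)]
  congr 1
  apply max?_id_perm
  -- rewrite B's filter predicate and count into A's
  have hedge : ∀ x ∈ distinctKeys (bfaCells grid),
      (!((bfaCells grid).any (fun d => d.1 == x && d.2)))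
        = (!(List.contains ((PySem.List.enumerate grid 0).foldl (fun s jrow =>
            (PySem.List.enumerate jrow.2 0).foldl (fun s icell =>
              if on_edge icell.1 jrow.1 grid then PySem.Set.add s icell.2 else s) s)
            PySem.Set.empty) x)) := by
    intro x _
    congr 1
    rw [Bool.eq_iff_iff]
    rw [List.contains_eq_mem]
    rw [decide_eq_true_iff]
    exact (cells_any_edge_iff grid x).trans (A_ignore_mem grid x).symm
  have hcnt : ∀ x : Int, ((bfaCells grid).map (fun d => d.1)).count x
      = (grid.flatMap (fun row => row)).count x :=
    fun x => (map_fst_cells_perm_flat grid).count_eq x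
  simp only [Function.comp_def]
  rw [List.filter_congr hedge]
  rw [List.map_congr_left (fun x _ => congrArg (fun n : Nat => (n : Int)) (hcnt x))]
  -- now a permutation of equal-shaped maps over filtered nodup label lists
  have hlbl : (distinctKeys (bfaCells grid)).Perm (PySem.Set.ofList (grid.flatMap (fun row => row))) := by
    rw [List.perm_ext_iff_of_nodup (nodup_distinctKeys _ (cells_pairwise grid))
      (PySem.Set.nodup_ofList _)]
    intro a
    rw [mem_distinctKeys _ (cells_pairwise grid) a, PySem.Set.mem_ofList]
    exact (map_fst_cells_perm_flat grid).mem_iff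
  exact ((hlbl.symm.filter _).map _)

-- ===== VERDICT (by name: the statement is the Claim_ definition above) =====
theorem biggest_finite_area_spec : Claim_equal_biggest_finite_area := by
  intro grid _ _
  unfold Spec_biggest_finite_area
  exact main_eq grid
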